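-- pv_equiv track=rewrite | github.com/fvictorio/uva_online_judge | 10149_Yahtzee/hungarian.py | assign_zero_in_row
-- ===== SOURCE A (Python) =====
-- def zeros_below (M, i, j):
--     cant = 0
--     for k in range(i+1, len(M)):
--         if M[k][j] == 0:
--             cant += 1
--     return cant
--
-- def assign_zero_in_row(M, i, cols_assigned):
--     n = len(M)
--     best_zero = -1
--     best_zb = n
--     for j in range(n):
--         if j in cols_assigned: continue
--         if M[i][j] == 0:
--             zb = zeros_below(M, i, j)
--             if zb < best_zb:
--                 best_zero = j
--                 best_zb = zb
--     return best_zero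
-- ===== SOURCE B (Python) =====
-- def assign_zero_in_row(M, i, cols_assigned):
--     n = len(M)
--     # eligible columns of row i: unassigned and holding a zero
--     eligible = [j for j in range(n) if j not in cols_assigned and M[i][j] == 0]
--     if not eligible:
--         return -1
--     # one pass over the rows below i: zero-count table, parallel to eligible
--     cnt = [0] * len(eligible)
--     for k in range(i + 1, n):
--         row = M[k]
--         cnt = [c + (1 if row[j] == 0 else 0) for j, c in zip(eligible, cnt)]
--     # selection pass: first eligible column with the strictly fewest zeros below
--     best = -1
--     best_zb = n
--     for j, c in zip(eligible, cnt):
--         if c < best_zb: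
--             best, best_zb = j, c
--     return best
-- ===== Notes on version B (the rewrite author's own statement) =====
-- stated objective: alternative
-- what changed: A rescans all rows below i once per unassigned zero column (zeros_below); B first collects the eligible columns of row i, then makes a single pass over the rows below i building a zero-count table parallel to that list, then one selection pass keeping the first strict minimum (same -1 sentinel).
import Mathlib
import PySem

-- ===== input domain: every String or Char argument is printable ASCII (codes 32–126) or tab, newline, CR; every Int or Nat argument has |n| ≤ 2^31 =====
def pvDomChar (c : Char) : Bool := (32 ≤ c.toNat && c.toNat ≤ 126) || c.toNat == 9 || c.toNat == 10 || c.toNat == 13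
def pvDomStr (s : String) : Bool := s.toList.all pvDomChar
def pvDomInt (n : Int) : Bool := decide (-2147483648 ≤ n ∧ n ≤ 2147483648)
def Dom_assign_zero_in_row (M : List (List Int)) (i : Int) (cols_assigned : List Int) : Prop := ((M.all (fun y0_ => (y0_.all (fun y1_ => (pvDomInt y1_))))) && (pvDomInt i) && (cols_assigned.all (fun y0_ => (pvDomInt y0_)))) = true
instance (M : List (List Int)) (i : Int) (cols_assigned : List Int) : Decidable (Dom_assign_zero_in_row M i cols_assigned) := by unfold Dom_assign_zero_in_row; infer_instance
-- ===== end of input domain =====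

-- B replaces A's per-zero-column rescan of the rows below i (zeros_below) by: first the list of
-- eligible columns, then one pass over the rows below i building a zero-count table parallel to that
-- list, then one selection pass over the table (objective: alternative decomposition).

-- ===== PORT A =====
-- xs[k] / M[k]: pyGetD is exact where the index is in range; Pre_ guarantees every index used is, so the default is never read
def pvRow (M : List (List Int)) (k : Int) : List Int := PySem.List.pyGetD M k []
def pvAt (xs : List Int) (j : Int) : Int := PySem.List.pyGetD xs j 0

def zeros_below (M : List (List Int)) (i j : Int) : Int :=
  (PySem.List.pyRange (i + 1) (M.length : Int) 1).foldl
    (fun cant k => if pvAt (pvRow M k) j = 0 then cant + 1 else cant) 0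

def assign_zero_in_row (M : List (List Int)) (i : Int) (cols_assigned : List Int) : Int :=
  let n : Int := (M.length : Int)
  ((PySem.List.pyRange 0 n 1).foldl
    (fun (st : Int × Int) j =>
      if j ∈ cols_assigned then st
      else if pvAt (pvRow M i) j = 0 then
        let zb := zeros_below M i j
        if zb < st.2 then (j, zb) else st
      else st)
    (-1, n)).1

-- ===== PORT B =====
def assign_zero_in_row_alt (M : List (List Int)) (i : Int) (cols_assigned : List Int) : Int :=
  let n : Int := (M.length : Int)
  let eligible : List Int :=
    (PySem.List.pyRange 0 n 1).filter
      (fun j => decide (j ∉ cols_assigned ∧ pvAt (pvRow M i) j = 0))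
  if eligible = [] then -1
  else
    let cnt : List Int :=
      (PySem.List.pyRange (i + 1) n 1).foldl
        (fun cnt k =>
          (eligible.zip cnt).map
            (fun jc => jc.2 + (if pvAt (pvRow M k) jc.1 = 0 then 1 else 0)))
        (List.replicate eligible.length 0)
    ((eligible.zip cnt).foldl
      (fun (st : Int × Int) jc => if jc.2 < st.2 then (jc.1, jc.2) else st)
      (-1, n)).1

-- ===== PRECONDITION & SPEC =====
-- Pre_ excludes exactly the inputs on which the Python A raises IndexError: whenever some column
-- j < n is unassigned, row index i must be valid (Python semantics, -n ≤ i < n) and row i at least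
-- j+1 long; and for every unassigned zero column j of row i, every row scanned below (indices
-- range(i+1, n), possibly negative) must be at least j+1 long.  B raises on exactly the same inputs.
def Pre_assign_zero_in_row (M : List (List Int)) (i : Int) (cols_assigned : List Int) : Prop :=
  ∀ jn : Nat, jn < M.length → ((jn : Int) ∉ cols_assigned) →
    ((-(M.length : Int) ≤ i ∧ i < (M.length : Int)) ∧
     jn < (pvRow M i).length ∧
     (pvAt (pvRow M i) (jn : Int) = 0 →
       ∀ k ∈ PySem.List.pyRange (i + 1) (M.length : Int) 1, jn < (pvRow M k).length))
instance (M : List (List Int)) (i : Int) (cols_assigned : List Int) : Decidable (Pre_assign_zero_in_row M i cols_assigned) := by unfold Pre_assign_zero_in_row; infer_instance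

def pvWitness_assign_zero_in_row : List (List Int) × Int × List Int := ([[0, 1], [0, 0]], 0, [1])

def Spec_assign_zero_in_row (M : List (List Int)) (i : Int) (cols_assigned : List Int) (out : Int) : Prop := out = assign_zero_in_row_alt M i cols_assigned
instance (M : List (List Int)) (i : Int) (cols_assigned : List Int) (out : Int) : Decidable (Spec_assign_zero_in_row M i cols_assigned out) := by unfold Spec_assign_zero_in_row; infer_instance

-- ===== CLAIM (what is proved, stated in full; the proofs are below) =====
def Claim_equal_assign_zero_in_row : Prop := ∀ (M : List (List Int)) (i : Int) (cols_assigned : List Int), Dom_assign_zero_in_row M i cols_assigned → Pre_assign_zero_in_row M i cols_assigned → Spec_assign_zero_in_row M i cols_assigned (assign_zero_in_row M i cols_assigned)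

-- ===== LEMMAS AND PROOFS =====

-- l.zip (l.map g) is l with each element paired with its g-value
theorem pvZipMapSelf {α β : Type} (l : List α) (g : α → β) :
    l.zip (l.map g) = l.map (fun j => (j, g j)) := by
  induction l with
  | nil => rfl
  | cons x xs ih => simp [ih]

-- the table-building fold, started from any l.map g, stays a map over l
theorem pvCntFold (M : List (List Int)) (l : List Int) (ks : List Int) (g : Int → Int) :
    ks.foldl
        (fun cnt k =>
          (l.zip cnt).map (fun jc => jc.2 + (if pvAt (pvRow M k) jc.1 = 0 then 1 else 0)))
        (l.map g)
      = l.map (fun j =>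
          ks.foldl (fun c k => if pvAt (pvRow M k) j = 0 then c + 1 else c) (g j)) := by
  induction ks generalizing g with
  | nil => rfl
  | cons k ks ih =>
    simp only [List.foldl_cons, pvZipMapSelf, List.map_map]
    have h : ((fun jc : Int × Int => jc.2 + (if pvAt (pvRow M k) jc.1 = 0 then 1 else 0)) ∘
        fun j => (j, g j))
        = fun j => (if pvAt (pvRow M k) j = 0 then g j + 1 else g j) := by
      funext j; by_cases h : pvAt (pvRow M k) j = 0 <;> simp [h]
    rw [h, ih (fun j => if pvAt (pvRow M k) j = 0 then g j + 1 else g j)]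

theorem pvReplicateMap (l : List Int) : List.replicate l.length (0 : Int) = l.map (fun _ => 0) := by
  simp

theorem assign_zero_in_row_spec : Claim_equal_assign_zero_in_row := by
  intro M i cols _hdom _hpre
  unfold Spec_assign_zero_in_row assign_zero_in_row assign_zero_in_row_alt
  dsimp only
  set n : Int := (M.length : Int) with hn
  set p : Int → Bool := fun j => decide (j ∉ cols ∧ pvAt (pvRow M i) j = 0) with hp
  set eligible : List Int := (PySem.List.pyRange 0 n 1).filter p with he
  -- A's fold equals the fold over the filtered column list
  have hA : ((PySem.List.pyRange 0 n 1).foldl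
      (fun (st : Int × Int) j =>
        if j ∈ cols then st
        else if pvAt (pvRow M i) j = 0 then
          let zb := zeros_below M i j
          if zb < st.2 then (j, zb) else st
        else st)
      (-1, n))
      = eligible.foldl
        (fun (st : Int × Int) j =>
          if zeros_below M i j < st.2 then (j, zeros_below M i j) else st) (-1, n) := by
    rw [he, List.foldl_filter]
    refine List.foldl_ext _ _ _ (fun st j _ => ?_)
    by_cases h1 : j ∈ cols <;> by_cases h2 : pvAt (pvRow M i) j = 0 <;>
      simp [hp, h1, h2]
  rw [hA]
  -- B side
  by_cases hne : eligible = []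
  · simp [hne]
  · simp only [if_neg hne]
    rw [pvReplicateMap, pvCntFold M eligible _ (fun _ => 0), pvZipMapSelf, List.foldl_map]
    exact congrArg Prod.fst (List.foldl_ext _ _ _ (fun st j _ => by simp [zeros_below, ← hn]))
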